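-- pv_equiv track=rewrite | github.com/benoxoft/adventofcode2016 | day16/day16.py | find_checksum
-- ===== SOURCE A (Python) =====
-- def find_checksum(data):
--     checksum = ""
--     for i in range(0, int(len(data)/2)):
--         a, b = data[i*2:i*2+2]
--         if a == b:
--             checksum += "1"
--         else:
--             checksum += "0"
--     if len(checksum) % 2 == 0:
--         return find_checksum(checksum)
--     else:
--         return checksum
-- ===== SOURCE B (Python) =====
-- def find_checksum(data):
--     while True:
--         data = "".join("1" if data[2*i] == data[2*i+1] else "0" for i in range(len(data) // 2))
--         if len(data) % 2 == 1:
--             return data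
-- ===== Notes on version B (the rewrite author's own statement) =====
-- stated objective: simpler
-- what changed: Replaced A's tail recursion with per-pair string concatenation and slice-and-unpack by an iterative while loop whose reduction pass is ''.join over a comprehension with direct indexing.
-- outside the precondition, e.g. on find_checksum(''): A raises RecursionError, B does not finish within the time limit; on find_checksum('0'): A raises RecursionError, B does not finish within the time limit
import Mathlib
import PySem

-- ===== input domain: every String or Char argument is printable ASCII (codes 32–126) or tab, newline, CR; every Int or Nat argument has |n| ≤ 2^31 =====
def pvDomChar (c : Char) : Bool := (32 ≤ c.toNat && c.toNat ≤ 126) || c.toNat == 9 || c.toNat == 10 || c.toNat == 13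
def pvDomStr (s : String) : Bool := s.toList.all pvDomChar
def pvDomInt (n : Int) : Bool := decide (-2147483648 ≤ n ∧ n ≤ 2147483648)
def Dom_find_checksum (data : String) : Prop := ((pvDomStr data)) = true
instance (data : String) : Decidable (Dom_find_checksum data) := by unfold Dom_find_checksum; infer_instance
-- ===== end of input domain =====

-- B replaces A's tail recursion (string += accumulation, slice-and-unpack of pairs) by an
-- iterative loop whose pass is a join over a comprehension with direct indexing; same cost, simpler.

-- ===== PORT A =====
-- the for-loop of A: checksum = ""; for i in range(0, int(len(data)/2)): a,b = data[i*2:i*2+2]; checksum += "1"/"0"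
def pvA_pass (data : List Char) : List Char :=
  (PySem.List.pyRange 0 ((data.length / 2 : Nat) : Int) 1).foldl
    (fun checksum i =>
      match PySem.List.slice data (some (i * 2)) (some (i * 2 + 2)) with
      | [a, b] => checksum ++ (if a == b then ['1'] else ['0'])
      | _ => checksum)   -- unpack of a non-2 slice raises ValueError in Python; unreachable for i in range
    []

-- A's recursion, made total with a fuel guard only (A raises RecursionError when length < 2;
-- Pre_ excludes those inputs and then the fuel len+1 is never exhausted)
def pvA_rec : Nat → List Char → List Char
  | 0, d => d
  | f + 1, d =>
      let checksum := pvA_pass d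
      if checksum.length % 2 == 0 then pvA_rec f checksum else checksum

def find_checksum (data : String) : String :=
  String.ofList (pvA_rec (data.toList.length + 1) data.toList)

-- ===== PORT B =====
-- B's pass: "".join("1" if data[2*i] == data[2*i+1] else "0" for i in range(len(data)//2))
def pvB_pass (d : List Char) : List Char :=
  (PySem.List.pyRange 0 ((d.length / 2 : Nat) : Int) 1).map
    (fun i => if PySem.List.pyGet? d (2 * i) == PySem.List.pyGet? d (2 * i + 1) then '1' else '0')

-- B's 'while True' loop, with the same fuel guard (B diverges exactly where A raises, outside Pre_)
def pvB_loop : Nat → List Char → List Char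
  | 0, d => d
  | f + 1, d =>
      let c := pvB_pass d
      if c.length % 2 == 1 then c else pvB_loop f c

def find_checksum_alt (data : String) : String :=
  String.ofList (pvB_loop (data.toList.length + 1) data.toList)

-- ===== PRECONDITION & SPEC =====
-- Pre_ excludes exactly the strings of length < 2, on which A raises RecursionError (and B loops forever).
def Pre_find_checksum (data : String) : Prop := 2 ≤ data.toList.length
instance (data : String) : Decidable (Pre_find_checksum data) := by unfold Pre_find_checksum; infer_instance

def pvWitness_find_checksum : String := "1011"

def Spec_find_checksum (data : String) (out : String) : Prop := out = find_checksum_alt data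
instance (data : String) (out : String) : Decidable (Spec_find_checksum data out) := by unfold Spec_find_checksum; infer_instance

-- ===== CLAIM (what is proved, stated in full; the proofs are below) =====
def Claim_equal_find_checksum : Prop := ∀ (data : String), Dom_find_checksum data → Pre_find_checksum data → Spec_find_checksum data (find_checksum data)

-- ===== LEMMAS AND PROOFS =====

-- the two reduction passes compute the same string
theorem pass_eq (d : List Char) : pvA_pass d = pvB_pass d := by
  unfold pvA_pass pvB_pass
  rw [PySem.List.foldl_congr_mem _ _
      (fun checksum i => checksum ++ [if PySem.List.pyGet? d (2 * i) == PySem.List.pyGet? d (2 * i + 1) then '1' else '0']) []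
      ?_]
  · exact PySem.List.foldl_append_singleton_eq_map _ _ _
  · intro acc i hi
    rw [PySem.List.mem_pyRange_one] at hi
    obtain ⟨h0, hlt⟩ := hi
    set k := i.toNat with hk
    have hik : i = (k : Int) := (Int.toNat_of_nonneg h0).symm
    have hklt : 2 * k + 1 < d.length := by
      have : (k : Int) < (d.length / 2 : Nat) := hik ▸ hlt
      omega
    have h2k : 2 * k < d.length := by omega
    have hslice : PySem.List.slice d (some (i * 2)) (some (i * 2 + 2)) = [d[2*k], d[2*k+1]] := by
      rw [PySem.List.slice_toNat d (by omega) (by omega)]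
      have h1 : (i * 2).toNat = 2 * k := by omega
      have h2 : (i * 2 + 2).toNat = 2 * k + 2 := by omega
      rw [h1, h2]
      have ht : 2 * k + 2 - 2 * k = 2 := by omega
      rw [ht, List.drop_eq_getElem_cons h2k, List.drop_eq_getElem_cons hklt,
          List.take_succ_cons, List.take_succ_cons, List.take_zero]
    simp only [hslice]
    have hg1 : PySem.List.pyGet? d (2 * i) = some d[2*k] := by
      have : (2 : Int) * i = ((2*k : Nat) : Int) := by omega
      rw [this, PySem.List.pyGet?_natCast, List.getElem?_eq_getElem h2k]
    have hg2 : PySem.List.pyGet? d (2 * i + 1) = some d[2*k+1] := by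
      have : (2 : Int) * i + 1 = ((2*k+1 : Nat) : Int) := by omega
      rw [this, PySem.List.pyGet?_natCast, List.getElem?_eq_getElem hklt]
    simp only [hg1, hg2, Option.some_beq_some]
    split_ifs <;> rfl


theorem rec_eq (f : Nat) (d : List Char) : pvA_rec f d = pvB_loop f d := by
  induction f generalizing d with
  | zero => rfl
  | succ f ih =>
    simp only [pvA_rec, pvB_loop, pass_eq]
    rcases Nat.even_or_odd (pvB_pass d).length with h | h
    · simp [Nat.even_iff.mp h, ih]
    · simp [Nat.odd_iff.mp h]

-- ===== VERDICT (by name: the statement is the Claim_ definition above) =====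
theorem find_checksum_spec : Claim_equal_find_checksum := by
  intro data _ _
  unfold Spec_find_checksum find_checksum find_checksum_alt
  rw [rec_eq]
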